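-- pv_equiv track=rewrite | github.com/wwwwodddd/Zukunft | leetcode/grumpy-bookstore-owner.py | maxSatisfied
-- ===== SOURCE A (Python) =====
-- from typing import List
--
-- def maxSatisfied(a: List[int], b: List[int], m: int) -> int:
--     z = s = t = 0
--     for i in range(len(a)):
--         t += (1 - b[i]) * a[i]
--         s += b[i] * a[i]
--         if i >= m:
--             s -= b[i - m] * a[i - m]
--         z = max(z, s)
--     return z + t
-- ===== SOURCE B (Python) =====
-- from typing import List
--
-- def maxSatisfied(a: List[int], b: List[int], m: int) -> int:
--     g = [y * x for x, y in zip(a, b)]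
--     P = [0]
--     for v in g:
--         P.append(P[-1] + v)
--     t = sum((1 - y) * x for x, y in zip(a, b))
--     z = 0
--     for i in range(len(a)):
--         gain = P[i + 1] - P[max(0, i + 1 - m)]
--         if gain > z:
--             z = gain
--     return z + t
-- ===== Notes on version B (the rewrite author's own statement) =====
-- stated objective: alternative
-- what changed: Replaces the rolling-sum sliding window (one fold carrying z,s,t with an on-the-fly subtraction of the element leaving the window) by a precomputed prefix-sum table over the grumpy contributions plus a separate lookup pass that reads each window sum as P[i+1]-P[max(0,i+1-m)].
import Mathlib
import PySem

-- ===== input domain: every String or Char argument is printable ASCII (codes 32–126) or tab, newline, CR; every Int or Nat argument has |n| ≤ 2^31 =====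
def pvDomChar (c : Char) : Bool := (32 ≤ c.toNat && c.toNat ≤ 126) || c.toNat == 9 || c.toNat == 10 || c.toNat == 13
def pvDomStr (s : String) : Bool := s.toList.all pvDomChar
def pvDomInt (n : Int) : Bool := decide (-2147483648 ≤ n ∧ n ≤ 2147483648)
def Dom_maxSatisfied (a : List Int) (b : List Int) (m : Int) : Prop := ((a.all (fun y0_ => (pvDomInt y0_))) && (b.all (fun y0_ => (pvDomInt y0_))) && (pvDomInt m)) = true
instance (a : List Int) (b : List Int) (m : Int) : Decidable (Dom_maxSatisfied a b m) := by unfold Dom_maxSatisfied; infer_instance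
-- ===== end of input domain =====

-- B replaces A's rolling-sum sliding window by a prefix-sum table plus a lookup pass
-- (alternative decomposition, same O(n) cost).

-- ===== PORT A =====
def maxSatisfied (a : List Int) (b : List Int) (m : Int) : Int :=
  let st := (PySem.List.pyRange 0 (a.length : Int) 1).foldl
    (fun (zst : Int × Int × Int) i =>
      let t := zst.2.2 + (1 - PySem.List.pyGetD b i 0) * PySem.List.pyGetD a i 0
      let s := zst.2.1 + PySem.List.pyGetD b i 0 * PySem.List.pyGetD a i 0
      let s := if m ≤ i then
                 s - PySem.List.pyGetD b (i - m) 0 * PySem.List.pyGetD a (i - m) 0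
               else s
      (max zst.1 s, s, t))
    (0, 0, 0)
  st.1 + st.2.2

-- ===== PORT B =====
def maxSatisfied_alt (a : List Int) (b : List Int) (m : Int) : Int :=
  let g := (a.zip b).map (fun p => p.2 * p.1)
  let P := g.foldl (fun P v => P ++ [PySem.List.pyGetD P (-1) 0 + v]) [0]
  let t := ((a.zip b).map (fun p => (1 - p.2) * p.1)).sum
  let z := (PySem.List.pyRange 0 (a.length : Int) 1).foldl
    (fun z i =>
      let gain := PySem.List.pyGetD P (i + 1) 0 - PySem.List.pyGetD P (max 0 (i + 1 - m)) 0
      if z < gain then gain else z) 0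
  z + t

-- ===== PRECONDITION & SPEC =====
-- Pre_ excludes exactly the inputs on which A raises IndexError: b shorter than a
-- (b[i] out of range), or a negative window size m with a nonempty a (b[i-m] out of range).
def Pre_maxSatisfied (a : List Int) (b : List Int) (m : Int) : Prop :=
  a.length ≤ b.length ∧ (0 ≤ m ∨ a = [])
instance (a : List Int) (b : List Int) (m : Int) : Decidable (Pre_maxSatisfied a b m) := by
  unfold Pre_maxSatisfied; infer_instance

def pvWitness_maxSatisfied : List Int × List Int × Int := ([1, 0, 1, 2, 1], [0, 1, 0, 1, 0], 3)

def Spec_maxSatisfied (a : List Int) (b : List Int) (m : Int) (out : Int) : Prop := out = maxSatisfied_alt a b m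
instance (a : List Int) (b : List Int) (m : Int) (out : Int) : Decidable (Spec_maxSatisfied a b m out) := by unfold Spec_maxSatisfied; infer_instance

-- ===== CLAIM (what is proved, stated in full; the proofs are below) =====
def Claim_equal_maxSatisfied : Prop := ∀ (a : List Int) (b : List Int) (m : Int), Dom_maxSatisfied a b m → Pre_maxSatisfied a b m → Spec_maxSatisfied a b m (maxSatisfied a b m)

-- ===== LEMMAS AND PROOFS =====

-- grumpy contribution g[j] = b[j]*a[j], its prefix sums, and the base sum
def gI (a b : List Int) (j : Nat) : Int :=
  PySem.List.pyGetD b (j : Int) 0 * PySem.List.pyGetD a (j : Int) 0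

def Ssum (a b : List Int) (k : Nat) : Int := ((List.range k).map (gI a b)).sum

def Tsum (a b : List Int) (k : Nat) : Int :=
  ((List.range k).map
    (fun (j : Nat) => (1 - PySem.List.pyGetD b (j : Int) 0) * PySem.List.pyGetD a (j : Int) 0)).sum

-- the running maximum both loops compute
def Zc (a b : List Int) (m : Int) : Nat → Int
  | 0 => 0
  | k + 1 => max (Zc a b m k) (Ssum a b (k + 1) - Ssum a b (((k : Int) + 1 - m).toNat))

theorem Ssum_succ (a b : List Int) (k : Nat) :
    Ssum a b (k + 1) = Ssum a b k + gI a b k := by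
  simp [Ssum, List.range_succ]

theorem Tsum_succ (a b : List Int) (k : Nat) :
    Tsum a b (k + 1)
      = Tsum a b k + (1 - PySem.List.pyGetD b (k : Int) 0) * PySem.List.pyGetD a (k : Int) 0 := by
  simp [Tsum, List.range_succ]

theorem A_loop (a b : List Int) (m : Int) (hm : 0 ≤ m) (k : Nat) :
    (PySem.List.pyRange 0 (k : Int) 1).foldl
      (fun (zst : Int × Int × Int) i =>
        let t := zst.2.2 + (1 - PySem.List.pyGetD b i 0) * PySem.List.pyGetD a i 0
        let s := zst.2.1 + PySem.List.pyGetD b i 0 * PySem.List.pyGetD a i 0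
        let s := if m ≤ i then
                   s - PySem.List.pyGetD b (i - m) 0 * PySem.List.pyGetD a (i - m) 0
                 else s
        (max zst.1 s, s, t)) (0, 0, 0)
    = (Zc a b m k, Ssum a b k - Ssum a b (((k : Int) - m).toNat), Tsum a b k) := by
  induction k with
  | zero =>
    have h0 : (((0 : Nat) : Int) - m).toNat = 0 := by omega
    simp only [h0]
    simp [Zc, Ssum, Tsum, PySem.List.pyRange_one_eq_nil (le_refl (0 : Int))]
  | succ k ih =>
    have hcast : ((k + 1 : Nat) : Int) = (k : Int) + 1 := by push_cast; ring
    rw [hcast, PySem.List.pyRange_one_succ_right (by positivity), List.foldl_append, ih]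
    simp only [List.foldl_cons, List.foldl_nil]
    by_cases hk : m ≤ (k : Int)
    · have h1 : (((k : Int) + 1 - m).toNat) = (((k : Int) - m).toNat) + 1 := by omega
      have h2 : ((((k : Int) - m).toNat : Nat) : Int) = (k : Int) - m := by omega
      have hg2 : PySem.List.pyGetD b ((k : Int) - m) 0 * PySem.List.pyGetD a ((k : Int) - m) 0
          = gI a b (((k : Int) - m).toNat) := by simp only [gI, h2]
      have hs : Ssum a b k - Ssum a b (((k : Int) - m).toNat)
            + PySem.List.pyGetD b (k : Int) 0 * PySem.List.pyGetD a (k : Int) 0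
            - PySem.List.pyGetD b ((k : Int) - m) 0 * PySem.List.pyGetD a ((k : Int) - m) 0
          = Ssum a b (k + 1) - Ssum a b (((k : Int) + 1 - m).toNat) := by
        simp only [hg2, h1, Ssum_succ]; simp only [gI]; ring
      simp only [if_pos hk, Prod.mk.injEq]
      exact ⟨by rw [Zc, hs], by rw [hs], by rw [Tsum_succ]⟩
    · have h1 : (((k : Int) + 1 - m).toNat) = 0 := by omega
      have h2 : (((k : Int) - m).toNat) = 0 := by omega
      have hs : Ssum a b k - Ssum a b (((k : Int) - m).toNat)
            + PySem.List.pyGetD b (k : Int) 0 * PySem.List.pyGetD a (k : Int) 0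
          = Ssum a b (k + 1) - Ssum a b (((k : Int) + 1 - m).toNat) := by
        have h0 : Ssum a b 0 = 0 := by simp [Ssum]
        rw [h1, h2, Ssum_succ, h0]; simp only [gI]; ring
      simp only [if_neg hk, Prod.mk.injEq]
      exact ⟨by rw [Zc, hs], by rw [hs], by rw [Tsum_succ]⟩

-- list-append scan: P[-1] of xs ++ [x] is x
theorem pyGetD_append_singleton_neg_one (xs : List Int) (x : Int) :
    PySem.List.pyGetD (xs ++ [x]) (-1) 0 = x := by
  simp [PySem.List.pyGetD, PySem.List.pyGet?, PySem.List.pyIdx?]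

-- the P-building loop of B is the prefix-sum scan
theorem scan_gen (g : List Int) : ∀ (acc : List Int),
    g.foldl (fun P v => P ++ [PySem.List.pyGetD P (-1) 0 + v]) acc
    = acc ++ (List.range g.length).map
        (fun k => PySem.List.pyGetD acc (-1) 0 + (g.take (k + 1)).sum) := by
  induction g with
  | nil => intro acc; simp
  | cons v g ih =>
    intro acc
    simp only [List.foldl_cons, ih (acc ++ [PySem.List.pyGetD acc (-1) 0 + v]),
      pyGetD_append_singleton_neg_one, List.length_cons, List.range_succ_eq_map,
      List.map_cons, List.map_map, List.append_assoc, List.singleton_append]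
    congr 1
    congr 1
    · simp
    · apply List.map_congr_left
      intro k _
      simp [List.take_succ_cons, Nat.succ_eq_add_one]
      ring

theorem scan_closed (g : List Int) :
    g.foldl (fun P v => P ++ [PySem.List.pyGetD P (-1) 0 + v]) [0]
    = (List.range (g.length + 1)).map (fun k => (g.take k).sum) := by
  rw [scan_gen]
  simp [List.range_succ_eq_map, List.map_map, PySem.List.pyGetD, PySem.List.pyGet?,
    PySem.List.pyIdx?, Nat.succ_eq_add_one]

theorem zip_map_eq_range_map (a b : List Int) (h : a.length ≤ b.length) (f : Int → Int → Int) :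
    (a.zip b).map (fun p => f p.1 p.2)
    = (List.range a.length).map
        (fun (j : Nat) => f (PySem.List.pyGetD a (j : Int) 0) (PySem.List.pyGetD b (j : Int) 0)) := by
  have hlen' : (a.zip b).length = a.length := by
    rw [List.length_zip]; omega
  apply List.ext_getElem (by simp [hlen'])
  intro i h1 h2
  have hia : i < a.length := by
    simp only [List.length_map, hlen'] at h1; exact h1
  have hib : i < b.length := lt_of_lt_of_le hia h
  simp only [List.getElem_map, List.getElem_zip, List.getElem_range]
  rw [PySem.List.pyGetD_eq_getElem a 0 (Int.natCast_nonneg i) (by exact_mod_cast hia),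
      PySem.List.pyGetD_eq_getElem b 0 (Int.natCast_nonneg i) (by exact_mod_cast hib)]
  simp

theorem P_closed (a b : List Int) (h : a.length ≤ b.length) :
    ((a.zip b).map (fun p => p.2 * p.1)).foldl
        (fun P v => P ++ [PySem.List.pyGetD P (-1) 0 + v]) [0]
    = (List.range (a.length + 1)).map (Ssum a b) := by
  rw [scan_closed]
  have hg : (a.zip b).map (fun p => p.2 * p.1)
      = (List.range a.length).map (gI a b) := by
    exact zip_map_eq_range_map a b h (fun x y => y * x)
  rw [hg]
  simp only [List.length_map, List.length_range]
  apply List.map_congr_left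
  intro k hk
  rw [List.mem_range] at hk
  rw [← List.map_take, List.take_range, Nat.min_eq_left (by omega)]
  rfl

theorem P_getD (a b : List Int) (j : Int) (h0 : 0 ≤ j) (h1 : j ≤ (a.length : Int)) :
    PySem.List.pyGetD ((List.range (a.length + 1)).map (Ssum a b)) j 0 = Ssum a b j.toNat := by
  rw [PySem.List.pyGetD_of_nonneg _ _ h0, PySem.List.getD_map_range _ _ _ _ (by omega)]

theorem B_loop (a b : List Int) (m : Int) (hm : 0 ≤ m) (k : Nat) (hk : k ≤ a.length) :
    (PySem.List.pyRange 0 (k : Int) 1).foldl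
      (fun z i =>
        let gain := PySem.List.pyGetD ((List.range (a.length + 1)).map (Ssum a b)) (i + 1) 0
          - PySem.List.pyGetD ((List.range (a.length + 1)).map (Ssum a b)) (max 0 (i + 1 - m)) 0
        if z < gain then gain else z) 0
    = Zc a b m k := by
  induction k with
  | zero => simp [PySem.List.pyRange_one_eq_nil (le_refl (0 : Int)), Zc]
  | succ k ih =>
    have hcast : ((k + 1 : Nat) : Int) = (k : Int) + 1 := by push_cast; ring
    rw [hcast, PySem.List.pyRange_one_succ_right (by positivity), List.foldl_append,
      ih (by omega)]
    simp only [List.foldl_cons, List.foldl_nil]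
    rw [P_getD a b ((k : Int) + 1) (by positivity) (by exact_mod_cast hk),
        P_getD a b (max 0 ((k : Int) + 1 - m)) (le_max_left _ _) (by
          have : (k : Int) + 1 ≤ (a.length : Int) := by exact_mod_cast hk
          omega)]
    have h1 : ((k : Int) + 1).toNat = k + 1 := by omega
    have h2 : (max 0 ((k : Int) + 1 - m)).toNat = ((k : Int) + 1 - m).toNat := by omega
    rw [h1, h2]
    show (if Zc a b m k < _ then _ else _) = Zc a b m (k + 1)
    rw [Zc]
    omega

theorem Tsum_eq (a b : List Int) (h : a.length ≤ b.length) :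
    ((a.zip b).map (fun p => (1 - p.2) * p.1)).sum = Tsum a b a.length := by
  rw [zip_map_eq_range_map a b h (fun x y => (1 - y) * x)]
  rfl

-- ===== VERDICT (by name: the statement is the Claim_ definition above) =====
theorem maxSatisfied_spec : Claim_equal_maxSatisfied := by
  intro a b m _ hpre
  obtain ⟨hlen, hm⟩ := hpre
  unfold Spec_maxSatisfied maxSatisfied maxSatisfied_alt
  rcases hm with hm | ha
  · simp only [A_loop a b m hm a.length, P_closed a b hlen,
      B_loop a b m hm a.length (le_refl _), Tsum_eq a b hlen]
  · subst ha
    simp [PySem.List.pyRange_one_eq_nil (le_refl (0 : Int))]
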